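-- pv_equiv track=rewrite | github.com/Prahalya05/pr_reviewer_qiskit | qiskitsage/rust_analyser.py | find_unsafe_blocks
-- ===== SOURCE A (Python) =====
-- from typing import List, Tuple, Optional
--
-- def find_unsafe_blocks(source: str) -> List[Tuple[int, bool]]:
--     """Find unsafe blocks and check for preceding safety comments."""
--     lines = []
--     source_lines = source.split('\n')
--
--     for i, line in enumerate(source_lines):
--         if 'unsafe {' in line or 'unsafe{' in line:
--             # Check previous non-empty line for safety comment
--             has_safety = False
--             for j in range(i-1, max(-1, i-5), -1):
--                 prev_line = source_lines[j].strip()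
--                 if prev_line and not prev_line.startswith('//'):
--                     break
--                 if prev_line.startswith(('// SAFETY:', '/// SAFETY:')):
--                     has_safety = True
--                     break
--
--             lines.append((i + 1, has_safety))
--
--     return lines
-- ===== SOURCE B (Python) =====
-- def _update(state, i, line):
--     s = line.strip()
--     if s.startswith('// SAFETY:') or s.startswith('/// SAFETY:'):
--         return (i, True)
--     if s and not s.startswith('//'):
--         return (i, False)
--     return state
--
--
-- def find_unsafe_blocks(source):
--     """One forward pass: remember the last 'significant' line (index, is_safety)."""
--     results = []
--     state = None  # (index, is_safety) of the last significant line seen so far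
--     for i, line in enumerate(source.split('\n')):
--         if 'unsafe {' in line or 'unsafe{' in line:
--             results.append((i + 1, state is not None and state[1] and state[0] >= i - 4))
--         state = _update(state, i, line)
--     return results
-- ===== Notes on version B (the rewrite author's own statement) =====
-- stated objective: alternative
-- what changed: Replaces A's per-unsafe-block backward rescan of up to four preceding lines with a single forward pass that carries the (index, is_safety) record of the last significant line and reads the answer from that state.
import Mathlib
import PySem

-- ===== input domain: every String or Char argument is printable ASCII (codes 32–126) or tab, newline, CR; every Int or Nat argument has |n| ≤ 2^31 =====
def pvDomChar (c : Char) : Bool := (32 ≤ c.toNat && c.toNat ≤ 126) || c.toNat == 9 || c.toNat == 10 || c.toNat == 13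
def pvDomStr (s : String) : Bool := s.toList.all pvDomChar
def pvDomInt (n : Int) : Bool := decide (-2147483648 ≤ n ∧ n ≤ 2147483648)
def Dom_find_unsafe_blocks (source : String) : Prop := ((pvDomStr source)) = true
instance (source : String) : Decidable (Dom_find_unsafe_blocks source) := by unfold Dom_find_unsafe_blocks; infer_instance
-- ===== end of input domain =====

-- B replaces A's per-block backward rescan with a single forward pass remembering the last
-- significant line (alternative decomposition; same return value everywhere).

-- ===== PORT A =====
-- the inner loop 'for j in range(i-1, max(-1, i-5), -1): … break …' of A (recursion = loop with break);
-- every j handed to it satisfies 0 ≤ j < len(src), so 'pyGetD src j ""' is exactly source_lines[j].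
def pvScanA (src : List String) : List Int → Bool
  | [] => false
  | j :: rest =>
    let prev := PySem.Str.strip (PySem.List.pyGetD src j "")
    if prev != "" && !(PySem.Str.startswith prev "//") then false
    else if PySem.Str.startswith prev "// SAFETY:" || PySem.Str.startswith prev "/// SAFETY:" then true
    else pvScanA src rest

-- source.split('\n') with a non-empty separator never raises: split? is always 'some' here
def find_unsafe_blocks (source : String) : List (Int × Bool) :=
  let source_lines := (PySem.Str.split? source "\n").getD []
  (PySem.List.enumerate source_lines 0).foldl
    (fun lines p =>
      if PySem.Str.isIn "unsafe {" p.2 || PySem.Str.isIn "unsafe{" p.2 then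
        lines ++ [(p.1 + 1,
          pvScanA source_lines (PySem.List.pyRange (p.1 - 1) (max (-1) (p.1 - 5)) (-1)))]
      else lines) []

-- ===== PORT B =====
-- helper _update of Source B: the (index, is_safety) record of the last significant line
def pvUpdB (state : Option (Int × Bool)) (i : Int) (line : String) : Option (Int × Bool) :=
  let s := PySem.Str.strip line
  if PySem.Str.startswith s "// SAFETY:" || PySem.Str.startswith s "/// SAFETY:" then some (i, true)
  else if s != "" && !(PySem.Str.startswith s "//") then some (i, false)
  else state

def find_unsafe_blocks_alt (source : String) : List (Int × Bool) :=
  (((PySem.List.enumerate ((PySem.Str.split? source "\n").getD []) 0)).foldl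
    (fun st p =>
      let results :=
        if PySem.Str.isIn "unsafe {" p.2 || PySem.Str.isIn "unsafe{" p.2 then
          st.1 ++ [(p.1 + 1,
            match st.2 with
            | some (k, b) => b && decide (k ≥ p.1 - 4)
            | none => false)]
        else st.1
      (results, pvUpdB st.2 p.1 p.2))
    (([] : List (Int × Bool)), (none : Option (Int × Bool)))).1

-- ===== PRECONDITION & SPEC =====
def Spec_find_unsafe_blocks (source : String) (out : List (Int × Bool)) : Prop := out = find_unsafe_blocks_alt source
instance (source : String) (out : List (Int × Bool)) : Decidable (Spec_find_unsafe_blocks source out) := by unfold Spec_find_unsafe_blocks; infer_instance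

-- ===== CLAIM (what is proved, stated in full; the proofs are below) =====
def Claim_equal_find_unsafe_blocks : Prop := ∀ (source : String), Dom_find_unsafe_blocks source → Spec_find_unsafe_blocks source (find_unsafe_blocks source)

-- ===== LEMMAS AND PROOFS =====

-- classification of a line, shared by both analyses
def pvIsSaf (line : String) : Bool :=
  PySem.Str.startswith (PySem.Str.strip line) "// SAFETY:" ||
  PySem.Str.startswith (PySem.Str.strip line) "/// SAFETY:"

def pvIsCode (line : String) : Bool :=
  (PySem.Str.strip line != "") && !(PySem.Str.startswith (PySem.Str.strip line) "//")

theorem pvUpdB_eq (st : Option (Int × Bool)) (i : Int) (line : String) :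
    pvUpdB st i line =
      if pvIsSaf line then some (i, true) else if pvIsCode line then some (i, false) else st := rfl

theorem pvScanA_cons (src : List String) (j : Int) (rest : List Int) :
    pvScanA src (j :: rest) =
      if pvIsCode (PySem.List.pyGetD src j "") then false
      else if pvIsSaf (PySem.List.pyGetD src j "") then true
      else pvScanA src rest := rfl

theorem pvIsCode_of_saf (line : String) (h : pvIsSaf line = true) : pvIsCode line = false := by
  have hcc : PySem.Str.startswith (PySem.Str.strip line) "//" = true := by
    simp only [pvIsSaf, Bool.or_eq_true, PySem.Str.startswith_eq] at h
    simp only [PySem.Str.startswith_eq]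
    rcases h with h | h
    · exact (PySem.Chars.startswith_iff _ _).mpr
        (List.IsPrefix.trans (by decide) ((PySem.Chars.startswith_iff _ _).mp h))
    · exact (PySem.Chars.startswith_iff _ _).mpr
        (List.IsPrefix.trans (by decide) ((PySem.Chars.startswith_iff _ _).mp h))
  simp only [pvIsCode, hcc, Bool.not_true, Bool.and_false]

-- B's state after the first n lines of L
def pvStateAt (L : List String) : Nat → Option (Int × Bool)
  | 0 => none
  | n + 1 => pvUpdB (pvStateAt L n) n (L.getD n "")

-- the value A's backward scan (down to, exclusively, lo) extracts from that state
def pvCond (st : Option (Int × Bool)) (lo : Int) : Bool :=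
  match st with
  | some (k, b) => b && decide (lo < k)
  | none => false

theorem pvStateAt_bound (L : List String) (n : Nat) (k : Int) (b : Bool)
    (h : pvStateAt L n = some (k, b)) : 0 ≤ k ∧ k < n := by
  induction n with
  | zero => simp [pvStateAt] at h
  | succ m ih =>
    rw [pvStateAt, pvUpdB_eq] at h
    split_ifs at h with h1 h2
    · cases h; constructor <;> omega
    · cases h; constructor <;> omega
    · rcases ih h with ⟨h0, hlt⟩; constructor <;> omega

theorem pvScanA_eq_state (L : List String) (n : Nat) :
    ∀ lo : Int, -1 ≤ lo →
    pvScanA L (PySem.List.pyRange ((n : Int) - 1) lo (-1)) = pvCond (pvStateAt L n) lo := by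
  induction n with
  | zero =>
    intro lo hlo
    rw [PySem.List.pyRange_neg_one_eq_nil (by omega)]
    rfl
  | succ m ih =>
    intro lo hlo
    have e : ((m + 1 : ℕ) : Int) - 1 = (m : Int) := by push_cast; ring
    rw [e]
    by_cases hcase : lo < (m : Int)
    · rw [PySem.List.pyRange_neg_one_cons hcase, pvScanA_cons, PySem.List.pyGetD_natCast,
        pvStateAt, pvUpdB_eq]
      by_cases hs : pvIsSaf (L.getD m "") = true
      · rw [pvIsCode_of_saf _ hs, hs]
        simp [pvCond, hcase]
      · by_cases hc : pvIsCode (L.getD m "") = true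
        · rw [Bool.not_eq_true] at hs
          rw [hs, hc]
          simp [pvCond]
        · rw [Bool.not_eq_true] at hs hc
          rw [hs, hc]
          simp only [Bool.false_eq_true, if_false]
          exact ih lo hlo
    · rw [PySem.List.pyRange_neg_one_eq_nil (by omega)]
      cases hst : pvStateAt L (m + 1) with
      | none => rfl
      | some p =>
        rcases p with ⟨k, b⟩
        have hb := pvStateAt_bound L (m + 1) k b hst
        have hk : ¬ (lo < k) := by omega
        simp [pvScanA, pvCond, hk]

-- the two folds, generalized over the still-unprocessed tail of lines
theorem pv_fold_eq (L : List String) :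
    ∀ (t : List String) (n : Nat), L.drop n = t → n ≤ L.length →
    ∀ acc : List (Int × Bool),
    (PySem.List.enumerate t (n : Int)).foldl
      (fun lines p =>
        if PySem.Str.isIn "unsafe {" p.2 || PySem.Str.isIn "unsafe{" p.2 then
          lines ++ [(p.1 + 1,
            pvScanA L (PySem.List.pyRange (p.1 - 1) (max (-1) (p.1 - 5)) (-1)))]
        else lines) acc
    = ((PySem.List.enumerate t (n : Int)).foldl
        (fun st p =>
          let results :=
            if PySem.Str.isIn "unsafe {" p.2 || PySem.Str.isIn "unsafe{" p.2 then
              st.1 ++ [(p.1 + 1,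
                match st.2 with
                | some (k, b) => b && decide (k ≥ p.1 - 4)
                | none => false)]
            else st.1
          (results, pvUpdB st.2 p.1 p.2))
        (acc, pvStateAt L n)).1 := by
  intro t
  induction t with
  | nil => intro n _ _ acc; simp [PySem.List.enumerate]
  | cons s t' ih =>
    intro n hdrop hn acc
    have hn' : n < L.length := by
      by_contra hc
      rw [List.drop_eq_nil_of_le (by omega)] at hdrop
      exact List.cons_ne_nil s t' hdrop.symm
    have h1 : L[n]? = some s := by
      have h0 : (L.drop n)[0]? = some s := by rw [hdrop]; rfl
      rwa [List.getElem?_drop, Nat.add_zero] at h0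
    have hLn : List.getD L n "" = s := by simp [List.getD, h1]
    have hdrop' : L.drop (n + 1) = t' := by
      have := congrArg (List.drop 1) hdrop
      simpa [List.drop_drop, Nat.add_comm] using this
    rw [PySem.List.enumerate_cons]
    simp only [List.foldl_cons]
    have hbool : pvScanA L (PySem.List.pyRange ((n : Int) - 1) (max (-1) ((n : Int) - 5)) (-1))
        = (match pvStateAt L n with
           | some (k, b) => b && decide (k ≥ (n : Int) - 4)
           | none => false) := by
      rw [pvScanA_eq_state L n (max (-1) ((n : Int) - 5)) (by omega)]
      cases hst : pvStateAt L n with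
      | none => rfl
      | some p =>
        rcases p with ⟨k, b⟩
        have hb := pvStateAt_bound L n k b hst
        simp only [pvCond]
        congr 1
        rw [decide_eq_decide]
        omega
    have hstate : pvUpdB (pvStateAt L n) (n : Int) s = pvStateAt L (n + 1) := by
      rw [pvStateAt, hLn]
    by_cases hun : (PySem.Str.isIn "unsafe {" s || PySem.Str.isIn "unsafe{" s) = true
    · simp only [hun, if_pos, hbool, hstate]
      have := ih (n + 1) hdrop' (by omega)
        (acc ++ [((n : Int) + 1,
          (match pvStateAt L n with
           | some (k, b) => b && decide (k ≥ (n : Int) - 4)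
           | none => false))])
      push_cast at this ⊢
      exact this
    · rw [Bool.not_eq_true] at hun
      simp only [hun, Bool.false_eq_true, if_false, hstate]
      have := ih (n + 1) hdrop' (by omega) acc
      push_cast at this ⊢
      exact this

-- ===== VERDICT (by name: the statement is the Claim_ definition above) =====
theorem find_unsafe_blocks_spec : Claim_equal_find_unsafe_blocks := by
  intro source _
  unfold Spec_find_unsafe_blocks find_unsafe_blocks find_unsafe_blocks_alt
  have := pv_fold_eq ((PySem.Str.split? source "\n").getD [])
    ((PySem.Str.split? source "\n").getD []) 0 rfl (Nat.zero_le _) []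
  simpa [pvStateAt] using this
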